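-- pv_equiv track=rewrite | github.com/ShadowPrince001/Timetable | genetic_timetable_generator.py | _count_time_conflicts
-- ===== SOURCE A (Python) =====
-- from typing import List, Dict, Tuple, Optional
--
-- def _count_time_conflicts(solution: List) -> int:
--     """Count time slot conflicts"""
--     time_assignments = {}
--     conflicts = 0
--
--     for assignment in solution:
--         time_id = assignment['time_slot_id']
--         if time_id in time_assignments:
--             conflicts += 1
--         else:
--             time_assignments[time_id] = assignment
--
--     return conflicts
-- ===== SOURCE B (Python) =====
-- def _count_time_conflicts(solution):
--     """Count time slot conflicts"""
--     ids = sorted(a['time_slot_id'] for a in solution)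
--     return sum(1 for x, y in zip(ids, ids[1:]) if x == y)
-- ===== Notes on version B (the rewrite author's own statement) =====
-- stated objective: alternative
-- what changed: Replaces A's one-pass seen-dict counting loop by sort-then-scan: sort all time_slot_ids and count adjacent equal pairs (each id with k occurrences yields k-1 adjacent equal pairs in the sorted list).
import Mathlib
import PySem

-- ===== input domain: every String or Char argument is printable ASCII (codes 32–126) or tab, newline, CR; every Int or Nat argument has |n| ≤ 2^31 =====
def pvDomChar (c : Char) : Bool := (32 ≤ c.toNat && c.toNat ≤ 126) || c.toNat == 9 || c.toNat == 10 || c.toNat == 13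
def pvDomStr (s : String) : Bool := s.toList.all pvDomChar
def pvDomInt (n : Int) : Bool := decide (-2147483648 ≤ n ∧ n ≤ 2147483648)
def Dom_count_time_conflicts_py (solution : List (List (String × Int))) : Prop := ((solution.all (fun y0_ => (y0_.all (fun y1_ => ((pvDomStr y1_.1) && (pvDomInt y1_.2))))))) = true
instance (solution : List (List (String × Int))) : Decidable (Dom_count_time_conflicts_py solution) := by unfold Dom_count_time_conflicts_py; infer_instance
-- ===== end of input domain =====

-- B replaces A's one-pass seen-dict counting loop by sort-then-scan: sort the ids, count adjacent equal pairs.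

-- ===== PORT A =====
-- assignment['time_slot_id'] : total form (getD) of the dict lookup, exact under Pre_ (the key is present)
def pvGetId (a : List (String × Int)) : Int :=
  PySem.Dict.getD (PySem.Dict.mk a) "time_slot_id" 0

def count_time_conflicts_py (solution : List (List (String × Int))) : Int :=
  (solution.foldl
    (fun (st : PySem.Dict Int (List (String × Int)) × Int) assignment =>
      let time_id := pvGetId assignment
      if st.1.contains time_id then (st.1, st.2 + 1)
      else (st.1.insert time_id assignment, st.2))
    (PySem.Dict.empty, 0)).2

-- ===== PORT B =====
def count_time_conflicts_py_alt (solution : List (List (String × Int))) : Int :=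
  let ids := PySem.List.sorted (solution.map pvGetId) (fun x => x) false
  (ids.zip (ids.drop 1)).foldl (fun c p => if p.1 = p.2 then c + 1 else c) 0

-- ===== PRECONDITION & SPEC =====
-- Pre_ excludes exactly the inputs on which Python A raises KeyError ('time_slot_id' missing from some assignment).
def Pre_count_time_conflicts_py (solution : List (List (String × Int))) : Prop :=
  ∀ a ∈ solution, (PySem.Dict.mk a).contains "time_slot_id" = true
instance (solution : List (List (String × Int))) : Decidable (Pre_count_time_conflicts_py solution) := by unfold Pre_count_time_conflicts_py; infer_instance

def pvWitness_count_time_conflicts_py : (List (List (String × Int))) :=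
  [[("time_slot_id", 1)], [("time_slot_id", 2)], [("time_slot_id", 1)]]

def Spec_count_time_conflicts_py (solution : List (List (String × Int))) (out : Int) : Prop := out = count_time_conflicts_py_alt solution
instance (solution : List (List (String × Int))) (out : Int) : Decidable (Spec_count_time_conflicts_py solution out) := by unfold Spec_count_time_conflicts_py; infer_instance

-- ===== CLAIM =====
def Claim_equal_count_time_conflicts_py : Prop := ∀ (solution : List (List (String × Int))), Dom_count_time_conflicts_py solution → Pre_count_time_conflicts_py solution → Spec_count_time_conflicts_py solution (count_time_conflicts_py solution)

-- ===== LEMMAS AND PROOFS =====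

-- Structural form of B's zip-scan: number of adjacent equal pairs.
def pvNatAdj : List Int → Nat
  | [] => 0
  | [_] => 0
  | a :: b :: t => (if a = b then 1 else 0) + pvNatAdj (b :: t)

theorem pv_foldl_zip_eq_natAdj (l : List Int) (c : Int) :
    (l.zip (l.drop 1)).foldl (fun c p => if p.1 = p.2 then c + 1 else c) c
      = c + (pvNatAdj l : Int) := by
  induction l generalizing c with
  | nil => simp [pvNatAdj]
  | cons a t ih =>
    cases t with
    | nil => simp [pvNatAdj]
    | cons b u =>
      simp only [List.drop_succ_cons, List.drop_zero, List.zip_cons_cons, List.foldl_cons]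
      rw [show (b :: u).drop 1 = u from rfl] at ih
      by_cases h : a = b
      · rw [if_pos h, ih]
        simp [pvNatAdj, h]; ring
      · rw [if_neg h, ih]
        simp [pvNatAdj, h]

-- On a ≤-sorted list, adjacent equal pairs = length − number of distinct elements.
theorem pv_natAdj_sorted (l : List Int) (hs : l.Pairwise (· ≤ ·)) :
    pvNatAdj l + l.toFinset.card = l.length := by
  induction l with
  | nil => simp [pvNatAdj]
  | cons a t ih =>
    cases t with
    | nil => simp [pvNatAdj]
    | cons b u =>
      rw [List.pairwise_cons] at hs
      obtain ⟨hab, ht⟩ := hs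
      have ih' := ih ht
      by_cases h : a = b
      · subst h
        have hfs : (a :: a :: u).toFinset = (a :: u).toFinset := by simp
        simp only [List.toFinset_cons, List.length_cons] at ih'
        simp [pvNatAdj, hfs]
        omega
      · have hanotin : a ∉ (b :: u) := by
          intro hm
          have h1 : a ≤ b := hab b (by simp)
          have h2 : b ≤ a := by
            rcases List.mem_cons.mp hm with rfl | hm'
            · exact le_refl a
            · exact (List.pairwise_cons.mp ht).1 a hm'
          exact h (le_antisymm h1 h2)
        have hcard : (a :: b :: u).toFinset.card = (b :: u).toFinset.card + 1 := by
          rw [List.toFinset_cons, Finset.card_insert_of_notMem (by simpa using hanotin)]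
        simp only [List.toFinset_cons, List.length_cons] at ih' hcard
        simp [pvNatAdj, h]
        omega

theorem pv_len_ofList_eq_card (l : List Int) :
    (PySem.Set.ofList l).length = l.toFinset.card := by
  have hnd : (PySem.Set.ofList l).Nodup := PySem.Set.nodup_ofList l
  have hfs : (PySem.Set.ofList l).toFinset = l.toFinset := by
    ext x; simp [List.mem_toFinset, PySem.Set.mem_ofList]
  rw [← hfs, List.toFinset_card_of_nodup hnd]

-- Loop invariant for A's fold: the conflict count is the prefix length minus the number of NEW distinct ids.
theorem pv_loop_inv (l : List (List (String × Int)))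
    (d : PySem.Dict Int (List (String × Int))) (c : Int) :
    (l.foldl
      (fun (st : PySem.Dict Int (List (String × Int)) × Int) assignment =>
        let time_id := pvGetId assignment
        if st.1.contains time_id then (st.1, st.2 + 1)
        else (st.1.insert time_id assignment, st.2))
      (d, c)).2
    = c + l.length
        - ((PySem.Set.update d.keys (l.map pvGetId)).length : Int)
        + (d.keys.length : Int) := by
  induction l generalizing d c with
  | nil => simp [PySem.Set.update]
  | cons a t ih =>
    simp only [List.foldl, List.map, List.length_cons]
    rw [PySem.Set.update_cons]
    by_cases h : d.contains (pvGetId a) = true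
    · rw [if_pos h, ih]
      have hmem : pvGetId a ∈ d.keys := (PySem.Dict.contains_iff_mem_keys d _).mp h
      have hadd : PySem.Set.add d.keys (pvGetId a) = d.keys := by
        simp [PySem.Set.add, hmem]
      rw [hadd]; push_cast; ring
    · rw [if_neg h, ih]
      have hmem : pvGetId a ∉ d.keys := fun hm => h ((PySem.Dict.contains_iff_mem_keys d _).mpr hm)
      have hk : (d.insert (pvGetId a) a).keys = d.keys ++ [pvGetId a] :=
        PySem.Dict.keys_insert_of_not_contains d a (by simpa using h)
      have hadd : PySem.Set.add d.keys (pvGetId a) = d.keys ++ [pvGetId a] := by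
        simp [PySem.Set.add, hmem]
      rw [hk, hadd]
      simp only [List.length_append, List.length_singleton]
      push_cast; ring

-- ===== VERDICT =====
theorem count_time_conflicts_py_spec : Claim_equal_count_time_conflicts_py := by
  intro solution _ _
  unfold Spec_count_time_conflicts_py count_time_conflicts_py count_time_conflicts_py_alt
  rw [pv_loop_inv, pv_foldl_zip_eq_natAdj]
  set ids := solution.map pvGetId with hids
  have hsorted := PySem.List.sorted_pairwise (xs := ids) (key := fun x => x)
  have hadj := pv_natAdj_sorted _ hsorted
  have hlen : (PySem.List.sorted ids (fun x => x) false).length = ids.length :=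
    PySem.List.length_sorted ..
  have hfs : (PySem.List.sorted ids (fun x => x) false).toFinset = ids.toFinset := by
    ext x; simp [List.mem_toFinset, PySem.List.mem_sorted]
  rw [hfs, hlen] at hadj
  have hempty : (PySem.Dict.empty (κ := Int) (ν := List (String × Int))).keys = [] := rfl
  rw [hempty]
  have hupd : PySem.Set.update ([] : List Int) ids = PySem.Set.ofList ids := by
    simp [PySem.Set.ofList_eq_foldl, PySem.Set.update]
  rw [hupd, pv_len_ofList_eq_card]
  have hslen : ids.length = solution.length := by simp [hids]
  simp only [List.length_nil]
  omega
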